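-- pv_equiv track=rewrite | github.com/anishmalikk/IB-Company-Screening-Tool | backend/ceo_cfo_extractor.py | parse_ceo_cfo_execs
-- ===== SOURCE A (Python) =====
-- from typing import Optional, Dict
--
-- def parse_ceo_cfo_execs(exec_str: str) -> Dict[str, Optional[str]]:
--     """Parse CEO and CFO from the formatted string"""
--     lines = exec_str.splitlines()
--     cfo = ceo = None
--
--     for line in lines:
--         line_lower = line.lower().strip()
--         if line_lower.startswith("cfo:"):
--             cfo = line.split(":", 1)[1].strip()
--         elif line_lower.startswith("ceo:"):
--             ceo = line.split(":", 1)[1].strip()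
--
--     return {"ceo": ceo, "cfo": cfo}
-- ===== SOURCE B (Python) =====
-- def parse_ceo_cfo_execs(exec_str):
--     """Parse CEO and CFO from the formatted string (index-first: build a label table, then look up)."""
--     table = {}
--     for line in exec_str.splitlines():
--         s = line.strip()
--         if ':' not in s:
--             continue
--         label, value = s.split(':', 1)
--         table[label.lower()] = value.strip()
--     return {"ceo": table.get("ceo"), "cfo": table.get("cfo")}
-- ===== Notes on version B (the rewrite author's own statement) =====
-- stated objective: idiomatic
-- what changed: Replaces the per-label prefix-branch scan with a generic pass that builds a label-to-value table (strip each line, split on the first colon, lowercase the label) and then looks the two role labels up in the table.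
import Mathlib
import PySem

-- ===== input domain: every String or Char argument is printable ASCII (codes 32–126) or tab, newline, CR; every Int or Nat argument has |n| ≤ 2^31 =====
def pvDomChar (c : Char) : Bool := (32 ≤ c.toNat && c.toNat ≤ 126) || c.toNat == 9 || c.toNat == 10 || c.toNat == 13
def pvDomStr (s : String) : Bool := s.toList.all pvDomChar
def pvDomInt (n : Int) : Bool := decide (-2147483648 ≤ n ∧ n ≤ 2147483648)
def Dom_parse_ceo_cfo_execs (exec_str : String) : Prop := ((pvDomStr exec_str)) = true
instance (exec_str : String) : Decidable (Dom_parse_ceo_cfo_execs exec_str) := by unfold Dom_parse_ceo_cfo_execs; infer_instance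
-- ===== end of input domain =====

-- B replaces A's per-label prefix-branch scan with a generic label→value table built in one pass, then two lookups (idiomatic; same cost).

-- ===== PORT A =====
-- one iteration of A's for-loop; state = (ceo, cfo)
def pvAStep (acc : Option String × Option String) (line : String) : Option String × Option String :=
  let line_lower := PySem.Str.strip (PySem.Str.lower line)
  if PySem.Str.startswith line_lower "cfo:" then
    (acc.1, some (PySem.Str.strip (((PySem.Str.splitMax? line ":" 1).getD [])[1]?.getD "")))
  else if PySem.Str.startswith line_lower "ceo:" then
    (some (PySem.Str.strip (((PySem.Str.splitMax? line ":" 1).getD [])[1]?.getD "")), acc.2)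
  else acc

def parse_ceo_cfo_execs (exec_str : String) : List (String × Option String) :=
  let lines := PySem.Str.splitlines exec_str
  let st := lines.foldl pvAStep (none, none)
  [("ceo", st.1), ("cfo", st.2)]

-- ===== PORT B =====
-- one iteration of B's for-loop; state = the label→value table
def pvBStep (d : PySem.Dict String String) (line : String) : PySem.Dict String String :=
  let s := PySem.Str.strip line
  if PySem.Str.isIn ":" s then
    let parts := (PySem.Str.splitMax? s ":" 1).getD []
    d.insert (PySem.Str.lower (parts[0]?.getD "")) (PySem.Str.strip (parts[1]?.getD ""))
  else d

def parse_ceo_cfo_execs_alt (exec_str : String) : List (String × Option String) :=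
  let table := (PySem.Str.splitlines exec_str).foldl pvBStep PySem.Dict.empty
  [("ceo", table.get? "ceo"), ("cfo", table.get? "cfo")]

-- ===== PRECONDITION & SPEC =====
def Spec_parse_ceo_cfo_execs (exec_str : String) (out : List (String × Option String)) : Prop := out = parse_ceo_cfo_execs_alt exec_str
instance (exec_str : String) (out : List (String × Option String)) : Decidable (Spec_parse_ceo_cfo_execs exec_str out) := by unfold Spec_parse_ceo_cfo_execs; infer_instance

-- ===== CLAIM (what is proved, stated in full; the proofs are below) =====
def Claim_equal_parse_ceo_cfo_execs : Prop := ∀ (exec_str : String), Dom_parse_ceo_cfo_execs exec_str → Spec_parse_ceo_cfo_execs exec_str (parse_ceo_cfo_execs exec_str)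

-- ===== LEMMAS AND PROOFS =====

-- Char facts about lowerChar / isspace
theorem pv_toNat_ofNat (n : ℕ) (h : Nat.isValidChar n) : (Char.ofNat n).toNat = n := by
  simp [Char.ofNat, h, Char.ofNatAux, Char.toNat]

theorem pv_upper_bounds (c : Char) (h : PySem.Chars.isupper c = true) : 65 ≤ c.toNat ∧ c.toNat ≤ 90 := by
  simp [PySem.Chars.isupper, Char.le_def, UInt32.le_iff_toNat_le] at h
  exact h

theorem pv_lowerChar_toNat (c : Char) (h : PySem.Chars.isupper c = true) : (PySem.Chars.lowerChar c).toNat = c.toNat + 32 := by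
  have hb := pv_upper_bounds c h
  simp [PySem.Chars.lowerChar, h]
  exact pv_toNat_ofNat _ (Or.inl (by omega))

theorem pv_lowerChar_colon (c : Char) : PySem.Chars.lowerChar c = ':' ↔ c = ':' := by
  constructor
  · intro h
    by_cases hu : PySem.Chars.isupper c = true
    · exfalso
      have ht := pv_lowerChar_toNat c hu
      rw [h] at ht
      have hb := pv_upper_bounds c hu
      have h58 : (':' : Char).toNat = 58 := rfl
      omega
    · simpa [PySem.Chars.lowerChar, hu] using h
  · intro h; subst h; decide

theorem pv_isspace_false (c : Char) (h1 : 33 ≤ c.toNat) (h2 : c.toNat ≤ 126) : PySem.Chars.isspace c = false := by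
  simp only [PySem.Chars.isspace]
  simp only [Bool.or_eq_false_iff, Bool.and_eq_false_iff, decide_eq_false_iff_not]
  omega

theorem pv_isspace_lowerChar (c : Char) : PySem.Chars.isspace (PySem.Chars.lowerChar c) = PySem.Chars.isspace c := by
  by_cases hu : PySem.Chars.isupper c = true
  · have h1 := pv_lowerChar_toNat c hu
    have hb := pv_upper_bounds c hu
    rw [pv_isspace_false _ (by omega) (by omega), pv_isspace_false _ (by omega) (by omega)]
  · simp [PySem.Chars.lowerChar, hu]

-- strip commutes with lower
theorem pv_isspace_comp : (PySem.Chars.isspace ∘ PySem.Chars.lowerChar) = PySem.Chars.isspace :=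
  funext pv_isspace_lowerChar

theorem pv_lstrip_lower (cs : List Char) : PySem.Chars.lstrip (PySem.Chars.lower cs) = PySem.Chars.lower (PySem.Chars.lstrip cs) := by
  simp only [PySem.Chars.lstrip, PySem.Chars.lower, List.dropWhile_map, pv_isspace_comp]

theorem pv_rstrip_lower (cs : List Char) : PySem.Chars.rstrip (PySem.Chars.lower cs) = PySem.Chars.lower (PySem.Chars.rstrip cs) := by
  simp only [PySem.Chars.rstrip, PySem.Chars.lower, List.map_reverse.symm, List.dropWhile_map, pv_isspace_comp]

theorem pv_strip_lower (cs : List Char) : PySem.Chars.strip (PySem.Chars.lower cs) = PySem.Chars.lower (PySem.Chars.strip cs) := by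
  rw [PySem.Chars.strip, PySem.Chars.strip, pv_lstrip_lower, pv_rstrip_lower]

-- strip decomposition and absorption of trailing whitespace
theorem pv_rstrip_decomp (y : List Char) : ∃ w, y = PySem.Chars.rstrip y ++ w ∧ ∀ c ∈ w, PySem.Chars.isspace c = true := by
  refine ⟨(y.reverse.takeWhile PySem.Chars.isspace).reverse, ?_, ?_⟩
  · rw [PySem.Chars.rstrip]
    conv_lhs => rw [← y.reverse_reverse, ← List.takeWhile_append_dropWhile (p := PySem.Chars.isspace) (l := y.reverse)]
    rw [List.reverse_append]
  · intro c hc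
    rw [List.mem_reverse] at hc
    exact List.mem_takeWhile_imp hc

theorem pv_strip_decomp (cs : List Char) : ∃ w1 w2, cs = w1 ++ PySem.Chars.strip cs ++ w2 ∧ (∀ c ∈ w1, PySem.Chars.isspace c = true) ∧ (∀ c ∈ w2, PySem.Chars.isspace c = true) := by
  obtain ⟨w2, h2, hsp2⟩ := pv_rstrip_decomp (PySem.Chars.lstrip cs)
  refine ⟨cs.takeWhile PySem.Chars.isspace, w2, ?_, ?_, hsp2⟩
  · rw [PySem.Chars.strip, List.append_assoc, ← h2, PySem.Chars.lstrip, List.takeWhile_append_dropWhile]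
  · intro c hc
    exact List.mem_takeWhile_imp hc

theorem pv_dropWhile_ws_nil (w : List Char) (h : ∀ c ∈ w, PySem.Chars.isspace c = true) : w.dropWhile PySem.Chars.isspace = [] :=
  List.dropWhile_eq_nil_iff.mpr (fun c hc => h c hc)

theorem pv_rstrip_append_ws (y w : List Char) (h : ∀ c ∈ w, PySem.Chars.isspace c = true) : PySem.Chars.rstrip (y ++ w) = PySem.Chars.rstrip y := by
  rw [PySem.Chars.rstrip, PySem.Chars.rstrip, List.reverse_append, List.dropWhile_append,
    pv_dropWhile_ws_nil w.reverse (fun c hc => h c (List.mem_reverse.mp hc))]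
  simp

theorem pv_strip_append_ws (x w : List Char) (h : ∀ c ∈ w, PySem.Chars.isspace c = true) : PySem.Chars.strip (x ++ w) = PySem.Chars.strip x := by
  rw [PySem.Chars.strip, PySem.Chars.strip, PySem.Chars.lstrip, PySem.Chars.lstrip, List.dropWhile_append]
  by_cases hx : (x.dropWhile PySem.Chars.isspace).isEmpty
  · rw [if_pos hx, pv_dropWhile_ws_nil w h]
    rw [List.isEmpty_iff] at hx
    rw [hx]
  · rw [if_neg hx, pv_rstrip_append_ws _ _ h]

-- splitOnMax with maxsplit = 1 at the first ':'
theorem pv_go_m0 (fuel : ℕ) (l cur : List Char) (acc : List (List Char)) :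
    PySem.Chars.splitOnMax.go [':'] fuel 0 l cur acc = ((cur.reverse ++ l) :: acc).reverse := by
  cases fuel with
  | zero => simp [PySem.Chars.splitOnMax.go]
  | succ n =>
    cases l with
    | nil => simp [PySem.Chars.splitOnMax.go]
    | cons c rest => simp [PySem.Chars.splitOnMax.go]

theorem pv_go_colon : ∀ (pre suf : List Char) (fuel : ℕ) (cur : List Char) (acc : List (List Char)), pre.length < fuel → ':' ∉ pre →
    PySem.Chars.splitOnMax.go [':'] fuel 1 (pre ++ ':' :: suf) cur acc = (suf :: (cur.reverse ++ pre) :: acc).reverse := by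
  intro pre
  induction pre with
  | nil =>
    intro suf fuel cur acc hf _
    cases fuel with
    | zero => omega
    | succ n =>
      have hpre : [':'].isPrefixOf (':' :: suf) = true := by simp [List.isPrefixOf]
      simp only [List.nil_append, PySem.Chars.splitOnMax.go, hpre]
      rw [if_neg (by omega : ¬ (1:ℕ) = 0)]
      simp only [if_true]
      rw [pv_go_m0]
      simp
  | cons c rest ih =>
    intro suf fuel cur acc hf hm
    cases fuel with
    | zero => simp at hf
    | succ n =>
      have hc : c ≠ ':' := fun h => hm (h ▸ List.mem_cons_self)
      have hpre : [':'].isPrefixOf (c :: (rest ++ ':' :: suf)) = false := by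
        simp [List.isPrefixOf]
        exact fun h => (hc h.symm).elim
      simp only [List.cons_append, PySem.Chars.splitOnMax.go, hpre]
      rw [if_neg (by omega : ¬ (1:ℕ) = 0)]
      simp only [Bool.false_eq_true, if_false]
      rw [ih suf n (c :: cur) acc (by simpa using hf) (fun h => hm (List.mem_cons_of_mem _ h))]
      simp

theorem pv_splitOnMax_colon (pre suf : List Char) (h : ':' ∉ pre) : PySem.Chars.splitOnMax (pre ++ ':' :: suf) [':'] 1 = [pre, suf] := by
  rw [PySem.Chars.splitOnMax, if_neg (by omega : ¬ (1:ℤ) < 0), (by decide : Int.toNat 1 = 1)]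
  rw [pv_go_colon pre suf _ [] [] (by simp) h]
  simp

-- A's prefix test characterised by B's label
theorem pv_main_prefix : ∀ (st k : List Char), ':' ∉ k →
    ((k ++ [':']) <+: PySem.Chars.lower st ↔
      ':' ∈ st ∧ PySem.Chars.lower (st.takeWhile (fun c => c != ':')) = k) := by
  intro st
  induction st with
  | nil =>
    intro k hk
    simp [PySem.Chars.lower]
  | cons a t ih =>
    intro k hk
    simp only [PySem.Chars.lower, List.map_cons] at *
    cases k with
    | nil =>
      rw [List.nil_append, show ([':'] : List Char) = ':' :: [] from rfl, List.cons_prefix_cons]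
      simp only [List.nil_prefix, and_true]
      by_cases ha : a = ':'
      · subst ha
        rw [List.takeWhile_cons]
        have h1 : PySem.Chars.lowerChar ':' = ':' := by decide
        simp [h1]
      · have hla : PySem.Chars.lowerChar a ≠ ':' := fun h => ha ((pv_lowerChar_colon a).mp h)
        rw [List.takeWhile_cons, if_pos (by simp [ha])]
        constructor
        · intro h; exact absurd h.symm hla
        · rintro ⟨_, h2⟩; simp at h2
    | cons b k' =>
      have hb : b ≠ ':' := fun h => hk (h ▸ List.mem_cons_self)
      have hk' : ':' ∉ k' := fun h => hk (List.mem_cons_of_mem _ h)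
      rw [List.cons_append, List.cons_prefix_cons]
      by_cases ha : a = ':'
      · subst ha
        rw [List.takeWhile_cons]
        have h1 : PySem.Chars.lowerChar ':' = ':' := by decide
        simp [h1, hb]
      · have hla : PySem.Chars.lowerChar a ≠ ':' := fun h => ha ((pv_lowerChar_colon a).mp h)
        rw [List.takeWhile_cons, if_pos (by simp [ha])]
        rw [ih k' hk']
        simp only [List.map_cons, List.mem_cons, List.cons.injEq]
        constructor
        · rintro ⟨h1, hm, h2⟩
          exact ⟨Or.inr hm, h1.symm, h2⟩
        · rintro ⟨hm, h1, h2⟩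
          rcases hm with hm | hm
          · exact absurd hm.symm ha
          · exact ⟨h1.symm, hm, h2⟩

theorem pv_main (st k : List Char) (hk : ':' ∉ k) :
    (PySem.Chars.startswith (PySem.Chars.lower st) (k ++ [':']) = true ↔
      ':' ∈ st ∧ PySem.Chars.lower (st.takeWhile (fun c => c != ':')) = k) := by
  rw [PySem.Chars.startswith_iff]
  exact pv_main_prefix st k hk

theorem pv_takeWhile_colon (lab rest : List Char) (h : ':' ∉ lab) :
    (lab ++ ':' :: rest).takeWhile (fun c => c != ':') = lab := by
  induction lab with
  | nil => simp
  | cons c t ih =>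
    have hc : c ≠ ':' := fun hh => h (hh ▸ List.mem_cons_self)
    rw [List.cons_append, List.takeWhile_cons, if_pos (by simp [hc])]
    rw [ih (fun hh => h (List.mem_cons_of_mem _ hh))]

theorem pv_colon_decomp (st : List Char) (h : ':' ∈ st) :
    ∃ lab rest, st = lab ++ ':' :: rest ∧ ':' ∉ lab := by
  induction st with
  | nil => simp at h
  | cons a t ih =>
    by_cases ha : a = ':'
    · exact ⟨[], t, by rw [ha]; rfl, by simp⟩
    · have hm : ':' ∈ t := by
        rcases List.mem_cons.mp h with hh | hh
        · exact absurd hh.symm ha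
        · exact hh
      obtain ⟨lab, rest, he, hn⟩ := ih hm
      exact ⟨a :: lab, rest, by rw [he]; rfl, by intro hh; rcases List.mem_cons.mp hh with h1 | h1; exacts [ha h1.symm, hn h1]⟩

-- the per-line relation between A's pair state and B's table
theorem pv_step_rel (line : String) (d : PySem.Dict String String) (acc : Option String × Option String)
    (h1 : d.get? "ceo" = acc.1) (h2 : d.get? "cfo" = acc.2) :
    (pvBStep d line).get? "ceo" = (pvAStep acc line).1 ∧ (pvBStep d line).get? "cfo" = (pvAStep acc line).2 := by
  have hLL : (PySem.Str.strip (PySem.Str.lower line)).toList = PySem.Chars.lower (PySem.Chars.strip line.toList) := by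
    simp only [PySem.Str.toList_strip, PySem.Str.toList_lower]
    exact pv_strip_lower line.toList
  have hcfoB : PySem.Str.startswith (PySem.Str.strip (PySem.Str.lower line)) "cfo:" =
      PySem.Chars.startswith (PySem.Chars.lower (PySem.Chars.strip line.toList)) (['c','f','o'] ++ [':']) := by
    rw [PySem.Str.startswith, hLL]; congr 1
  have hceoB : PySem.Str.startswith (PySem.Str.strip (PySem.Str.lower line)) "ceo:" =
      PySem.Chars.startswith (PySem.Chars.lower (PySem.Chars.strip line.toList)) (['c','e','o'] ++ [':']) := by
    rw [PySem.Str.startswith, hLL]; congr 1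
  by_cases hcolon : ':' ∈ PySem.Chars.strip line.toList
  · -- the stripped line contains a colon
    obtain ⟨lab, rest, hst, hlab⟩ := pv_colon_decomp _ hcolon
    have htw : (PySem.Chars.strip line.toList).takeWhile (fun c => c != ':') = lab := by
      rw [hst]; exact pv_takeWhile_colon lab rest hlab
    have hIn : PySem.Str.isIn ":" (PySem.Str.strip line) = true := by
      rw [PySem.Str.isIn_eq, PySem.Str.toList_strip]
      exact (PySem.Chars.isIn_iff_infix _ _).mpr ((List.singleton_infix_iff ':' _).mpr hcolon)
    have hparts : (PySem.Str.splitMax? (PySem.Str.strip line) ":" 1).getD [] = [String.ofList lab, String.ofList rest] := by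
      rw [PySem.Str.splitMax?, PySem.Chars.splitMax?, PySem.Str.toList_strip]
      rw [if_neg (by decide : ¬ (":".toList.isEmpty = true))]
      rw [show (":".toList : List Char) = [':'] from rfl]
      rw [hst, pv_splitOnMax_colon lab rest hlab]
      rfl
    have hBv : pvBStep d line = d.insert (String.ofList (PySem.Chars.lower lab)) (String.ofList (PySem.Chars.strip rest)) := by
      simp only [pvBStep, hIn, if_true, hparts]
      simp only [List.getElem?_cons_zero, List.getElem?_cons_succ, Option.getD_some]
      rw [PySem.Str.lower, PySem.Str.strip, String.toList_ofList, String.toList_ofList]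
    obtain ⟨w1, w2, hcs, hw1, hw2⟩ := pv_strip_decomp line.toList
    have hw1c : ':' ∉ w1 ++ lab := by
      intro hm
      rcases List.mem_append.mp hm with hm | hm
      · have := hw1 _ hm
        simp [PySem.Chars.isspace] at this
      · exact hlab hm
    have hAval : PySem.Str.strip (((PySem.Str.splitMax? line ":" 1).getD [])[1]?.getD "") = String.ofList (PySem.Chars.strip rest) := by
      have hsc : PySem.Chars.splitOnMax line.toList [':'] 1 = [w1 ++ lab, rest ++ w2] := by
        have : line.toList = (w1 ++ lab) ++ ':' :: (rest ++ w2) := by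
          rw [hcs, hst]; simp
        rw [this, pv_splitOnMax_colon _ _ hw1c]
      rw [PySem.Str.splitMax?, PySem.Chars.splitMax?]
      rw [if_neg (by decide : ¬ (":".toList.isEmpty = true))]
      rw [show (":".toList : List Char) = [':'] from rfl, hsc]
      simp only [Option.map_some, List.map_cons, List.map_nil, Option.getD_some,
        List.getElem?_cons_zero, List.getElem?_cons_succ, Option.getD_some]
      rw [PySem.Str.strip, String.toList_ofList, pv_strip_append_ws rest w2 hw2]
    have hmain_cfo := pv_main (PySem.Chars.strip line.toList) ['c','f','o'] (by decide)
    have hmain_ceo := pv_main (PySem.Chars.strip line.toList) ['c','e','o'] (by decide)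
    rw [htw] at hmain_cfo hmain_ceo
    by_cases hcl : PySem.Chars.lower lab = ['c','f','o']
    · -- the label is "cfo"
      have hK : String.ofList (PySem.Chars.lower lab) = "cfo" := by rw [hcl]
      have hA_cfo : PySem.Str.startswith (PySem.Str.strip (PySem.Str.lower line)) "cfo:" = true := by
        rw [hcfoB]; exact hmain_cfo.mpr ⟨hcolon, hcl⟩
      simp only [pvAStep, hA_cfo, if_true, hBv, hK, hAval]
      constructor
      · rw [PySem.Dict.get?_insert_of_ne d _ (by decide : ("ceo" : String) ≠ "cfo")]
        exact h1
      · rw [PySem.Dict.get?_insert_self]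
    · by_cases hce : PySem.Chars.lower lab = ['c','e','o']
      · -- the label is "ceo"
        have hK : String.ofList (PySem.Chars.lower lab) = "ceo" := by rw [hce]
        have hA_cfo : PySem.Str.startswith (PySem.Str.strip (PySem.Str.lower line)) "cfo:" = false := by
          rw [hcfoB]
          rw [Bool.eq_false_iff]
          intro hcontra
          exact hcl (hmain_cfo.mp hcontra).2
        have hA_ceo : PySem.Str.startswith (PySem.Str.strip (PySem.Str.lower line)) "ceo:" = true := by
          rw [hceoB]; exact hmain_ceo.mpr ⟨hcolon, hce⟩
        simp only [pvAStep, hA_cfo, hA_ceo, Bool.false_eq_true, if_false, if_true, hBv, hK, hAval]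
        constructor
        · rw [PySem.Dict.get?_insert_self]
        · rw [PySem.Dict.get?_insert_of_ne d _ (by decide : ("cfo" : String) ≠ "ceo")]
          exact h2
      · -- some other label: A ignores the line, B's insert touches neither "ceo" nor "cfo"
        have hA_cfo : PySem.Str.startswith (PySem.Str.strip (PySem.Str.lower line)) "cfo:" = false := by
          rw [hcfoB, Bool.eq_false_iff]
          intro hcontra
          exact hcl (hmain_cfo.mp hcontra).2
        have hA_ceo : PySem.Str.startswith (PySem.Str.strip (PySem.Str.lower line)) "ceo:" = false := by
          rw [hceoB, Bool.eq_false_iff]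
          intro hcontra
          exact hce (hmain_ceo.mp hcontra).2
        have hKceo : ("ceo" : String) ≠ String.ofList (PySem.Chars.lower lab) := by
          intro hh
          exact hce (by rw [← String.toList_ofList (l := PySem.Chars.lower lab), ← hh]; rfl)
        have hKcfo : ("cfo" : String) ≠ String.ofList (PySem.Chars.lower lab) := by
          intro hh
          exact hcl (by rw [← String.toList_ofList (l := PySem.Chars.lower lab), ← hh]; rfl)
        simp only [pvAStep, hA_cfo, hA_ceo, Bool.false_eq_true, if_false, hBv]
        exact ⟨by rw [PySem.Dict.get?_insert_of_ne d _ hKceo]; exact h1,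
               by rw [PySem.Dict.get?_insert_of_ne d _ hKcfo]; exact h2⟩
  · -- no colon in the stripped line: both steps leave their state unchanged
    have hIn : PySem.Str.isIn ":" (PySem.Str.strip line) = false := by
      rw [PySem.Str.isIn_eq, PySem.Str.toList_strip]
      rw [PySem.Chars.isIn_eq_false_iff]
      intro hinf
      exact hcolon ((List.singleton_infix_iff ':' _).mp hinf)
    have hmain_cfo := pv_main (PySem.Chars.strip line.toList) ['c','f','o'] (by decide)
    have hmain_ceo := pv_main (PySem.Chars.strip line.toList) ['c','e','o'] (by decide)
    have hA_cfo : PySem.Str.startswith (PySem.Str.strip (PySem.Str.lower line)) "cfo:" = false := by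
      rw [hcfoB, Bool.eq_false_iff]
      intro hcontra
      exact hcolon (hmain_cfo.mp hcontra).1
    have hA_ceo : PySem.Str.startswith (PySem.Str.strip (PySem.Str.lower line)) "ceo:" = false := by
      rw [hceoB, Bool.eq_false_iff]
      intro hcontra
      exact hcolon (hmain_ceo.mp hcontra).1
    simp only [pvAStep, pvBStep, hA_cfo, hA_ceo, hIn, Bool.false_eq_true, if_false]
    exact ⟨h1, h2⟩

theorem pv_fold_rel (lines : List String) (d : PySem.Dict String String) (acc : Option String × Option String)
    (h1 : d.get? "ceo" = acc.1) (h2 : d.get? "cfo" = acc.2) :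
    (lines.foldl pvBStep d).get? "ceo" = (lines.foldl pvAStep acc).1 ∧
    (lines.foldl pvBStep d).get? "cfo" = (lines.foldl pvAStep acc).2 := by
  induction lines generalizing d acc with
  | nil => exact ⟨h1, h2⟩
  | cons l t ih =>
    have h := pv_step_rel l d acc h1 h2
    simp only [List.foldl_cons]
    exact ih _ _ h.1 h.2

-- ===== VERDICT (by name: the statement is the Claim_ definition above) =====
theorem parse_ceo_cfo_execs_spec : Claim_equal_parse_ceo_cfo_execs := by
  intro s _
  have h := pv_fold_rel (PySem.Str.splitlines s) PySem.Dict.empty (none, none) rfl rfl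
  show parse_ceo_cfo_execs s = parse_ceo_cfo_execs_alt s
  simp only [parse_ceo_cfo_execs, parse_ceo_cfo_execs_alt, h.1, h.2]
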